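-- pv_equiv track=rewrite | github.com/joshiaj7/CodingChallenges | python3/lexicographically_minimum_string_after_removing_stars.py | clearStars
-- ===== SOURCE A (Python) =====
-- from heapq import heappop, heappush
--
-- def clearStars(s: str) -> str:
--     ans = ""
--     heap = []
--
--     for i, l in enumerate(s):
--         if l == "*":
--             if not heap:
--                 continue
--             heappop(heap)
--         else:
--             heappush(heap, (l, -i))
--
--     heap.sort(key=lambda x: -x[1])
--     for l, _ in heap:
--         ans += l
--
--     return ans
-- ===== SOURCE B (Python) =====
-- def clearStars(s: str) -> str:
--     # One stack of indices per letter; each '*' pops the most recent index of the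
--     # smallest live letter.  Survivors are read off the original string in order.
--     stacks = {}
--     removed = set()
--     for i, c in enumerate(s):
--         if c == "*":
--             live = [k for k in stacks if stacks[k]]
--             if live:
--                 removed.add(stacks[min(live)].pop())
--         else:
--             stacks.setdefault(c, []).append(i)
--     return "".join(c for i, c in enumerate(s) if c != "*" and i not in removed)
-- ===== Notes on version B (the rewrite author's own statement) =====
-- stated objective: faster
-- what changed: Replaces the heap of (letter,-index) pairs plus the final sort with per-letter index stacks (each star pops the top of the smallest live letter's stack) and a removed-index set filtered against the original string, eliminating heap operations and the final sort.
import Mathlib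
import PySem

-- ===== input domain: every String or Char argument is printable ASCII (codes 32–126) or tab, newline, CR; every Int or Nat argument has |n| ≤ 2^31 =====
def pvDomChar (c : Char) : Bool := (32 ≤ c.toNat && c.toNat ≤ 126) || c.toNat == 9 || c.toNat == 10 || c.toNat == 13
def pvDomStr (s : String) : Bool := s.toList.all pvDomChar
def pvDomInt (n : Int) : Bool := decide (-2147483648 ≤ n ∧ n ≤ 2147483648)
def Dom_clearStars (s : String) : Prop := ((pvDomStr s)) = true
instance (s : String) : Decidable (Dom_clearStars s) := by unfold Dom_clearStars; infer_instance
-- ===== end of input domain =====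

-- B replaces A's heap + final sort with per-letter index stacks and a removed-index set (measured faster).

-- ===== PORT A =====
-- heapq is modelled by its contract: the heap is the list of its elements; heappush appends,
-- heappop removes the least pair (Python tuple order = lexicographic).  Exact here: all pairs
-- are distinct, so the C heap's internal array layout is unobservable in A's result.
def aStep (h : List (Char × Int)) (p : Int × Char) : List (Char × Int) :=
  if p.2 = '*' then
    match PySem.List.min2? h (fun x => x.1) (fun x => x.2) with
    | none => h
    | some m => h.erase m
  else h ++ [(p.2, -p.1)]

def clearStars (s : String) : String :=
  let heap := (PySem.List.enumerate s.toList).foldl aStep []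
  String.ofList ((PySem.List.sorted heap (fun x => -x.2) false).map (fun x => x.1))

-- ===== PORT B =====
-- state: (per-letter stacks of indices, set of removed indices)
def bStep (st : PySem.Dict Char (List Int) × PySem.Set Int) (p : Int × Char) :
    PySem.Dict Char (List Int) × PySem.Set Int :=
  if p.2 = '*' then
    -- live = [k for k in stacks if stacks[k]]; 'if live: ... min(live)' is the match on min?
    match PySem.List.min? (st.1.keys.filter (fun k => !((st.1.getD k []).isEmpty))) (fun k => k) with
    | none => st
    | some k =>
      match PySem.List.pop? (st.1.getD k []) (-1) with
      | none => st   -- unreachable (a live letter's stack is nonempty); keeps the step total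
      | some (i, rest) => (st.1.insert k rest, st.2.add i)
  else (st.1.modify p.2 [] (fun l => l ++ [p.1]), st.2)

def clearStars_alt (s : String) : String :=
  let st := (PySem.List.enumerate s.toList).foldl bStep (PySem.Dict.empty, PySem.Set.empty)
  String.ofList (((PySem.List.enumerate s.toList).filter
      (fun p => !(p.2 == '*') && !(PySem.Set.contains st.2 p.1))).map (fun p => p.2))

-- ===== PRECONDITION & SPEC =====
def Spec_clearStars (s : String) (out : String) : Prop := out = clearStars_alt s
instance (s : String) (out : String) : Decidable (Spec_clearStars s out) := by unfold Spec_clearStars; infer_instance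

-- ===== CLAIM (what is proved, stated in full; the proofs are below) =====
def Claim_equal_clearStars : Prop := ∀ (s : String), Dom_clearStars s → Spec_clearStars s (clearStars s)

-- ===== LEMMAS AND PROOFS =====

-- the (letter, -index) pairs contributed by one stack entry
def gpair (q : Char × List Int) : List (Char × Int) := q.2.map (fun i => (q.1, -i))

-- the multiset of (letter, -index) pairs held by B's stacks
def msetOf (d : PySem.Dict Char (List Int)) : List (Char × Int) :=
  d.items.flatMap gpair

-- the pairs pushed by the non-star entries of l
def pushesOf (l : List (Int × Char)) : List (Char × Int) :=
  (l.filter (fun p => !(p.2 == '*'))).map (fun p => (p.2, -p.1))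

-- a pair survives iff its index was not removed
def aliveF (r : PySem.Set Int) : (Char × Int) → Bool := fun x => !(PySem.Set.contains r (-x.2))

-- Python tuple order on (char, int)
def lexLe (a b : Char × Int) : Prop := a.1 < b.1 ∨ (a.1 = b.1 ∧ a.2 ≤ b.2)

-- coupling invariant between A's heap and B's state, k = number of consumed characters
def CoupleInv (h : List (Char × Int)) (d : PySem.Dict Char (List Int)) (r : PySem.Set Int) (k : Int) : Prop :=
  h.Perm (msetOf d) ∧
  d.keys.Nodup ∧
  (∀ q ∈ d.items, q.2.Pairwise (· < ·) ∧ ∀ i ∈ q.2, i < k) ∧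
  (∀ i ∈ r, i < k) ∧
  (h.map (fun x => -x.2)).Nodup ∧
  (∀ x ∈ h, (-x.2) ∉ r)

lemma lexLe_trans {a b c : Char × Int} (h1 : lexLe a b) (h2 : lexLe b c) : lexLe a c := by
  rcases h1 with h1 | ⟨e1, le1⟩ <;> rcases h2 with h2 | ⟨e2, le2⟩
  · exact Or.inl (lt_trans h1 h2)
  · exact Or.inl (e2 ▸ h1)
  · exact Or.inl (e1 ▸ h2)
  · exact Or.inr ⟨e1.trans e2, le_trans le1 le2⟩

def minStep (acc : Option (Char × Int)) (x : Char × Int) : Option (Char × Int) :=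
  match acc with
  | none => some x
  | some m => if (decide (x.1 < m.1) || (!decide (m.1 < x.1) && decide (x.2 < m.2))) = true then some x else some m

lemma min2?_eq_fold (xs : List (Char × Int)) :
    PySem.List.min2? xs (fun x => x.1) (fun x => x.2) = xs.foldl minStep none := by
  unfold PySem.List.min2?
  congr 1
  funext acc x
  cases acc <;> rfl

lemma minStep_spec (m0 x : Char × Int) :
    (minStep (some m0) x = some x ∧ lexLe x m0) ∨ (minStep (some m0) x = some m0 ∧ lexLe m0 x) := by
  by_cases h1 : x.1 < m0.1
  · exact Or.inl ⟨by simp [minStep, h1], Or.inl h1⟩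
  · by_cases h2 : m0.1 < x.1
    · exact Or.inr ⟨by simp [minStep, h1, h2], Or.inl h2⟩
    · have heq : x.1 = m0.1 := le_antisymm (not_lt.mp h2) (not_lt.mp h1)
      by_cases h3 : x.2 < m0.2
      · exact Or.inl ⟨by simp [minStep, h1, h2, h3], Or.inr ⟨heq, le_of_lt h3⟩⟩
      · exact Or.inr ⟨by simp [minStep, h1, h2, h3], Or.inr ⟨heq.symm, not_lt.mp h3⟩⟩

lemma min2?_fold_spec (t : List (Char × Int)) : ∀ m0 : Char × Int,
    ∃ m, t.foldl minStep (some m0) = some m ∧ (m = m0 ∨ m ∈ t) ∧ lexLe m m0 ∧ ∀ y ∈ t, lexLe m y := by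
  induction t with
  | nil => intro m0; exact ⟨m0, rfl, Or.inl rfl, Or.inr ⟨rfl, le_refl _⟩, by simp⟩
  | cons x t ih =>
    intro m0
    rcases minStep_spec m0 x with ⟨he, hle⟩ | ⟨he, hle⟩
    · obtain ⟨m, hm, hmem, hlem, hall⟩ := ih x
      refine ⟨m, by simpa [he] using hm, ?_, lexLe_trans hlem hle, ?_⟩
      · rcases hmem with h | h
        · exact Or.inr (by simp [h])
        · exact Or.inr (by simp [h])
      · intro y hy
        rcases List.mem_cons.mp hy with h | h
        · exact h ▸ hlem
        · exact hall y h
    · obtain ⟨m, hm, hmem, hlem, hall⟩ := ih m0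
      refine ⟨m, by simpa [he] using hm, ?_, hlem, ?_⟩
      · rcases hmem with h | h
        · exact Or.inl h
        · exact Or.inr (by simp [h])
      · intro y hy
        rcases List.mem_cons.mp hy with h | h
        · exact h ▸ lexLe_trans hlem hle
        · exact hall y h

lemma min2?_spec (h : List (Char × Int)) (hne : h ≠ []) :
    ∃ m, PySem.List.min2? h (fun x => x.1) (fun x => x.2) = some m ∧ m ∈ h ∧ ∀ y ∈ h, lexLe m y := by
  rcases h with _ | ⟨x, t⟩
  · exact absurd rfl hne
  · obtain ⟨m, hm, hmem, hlem, hall⟩ := min2?_fold_spec t x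
    refine ⟨m, ?_, ?_, ?_⟩
    · rw [min2?_eq_fold]; simpa [List.foldl, minStep] using hm
    · rcases hmem with h | h
      · simp [h]
      · simp [h]
    · intro y hy
      rcases List.mem_cons.mp hy with h | h
      · exact h ▸ hlem
      · exact hall y h

lemma find?_keys (l : List (Char × List Int)) (hnd : (l.map Prod.fst).Nodup) {k : Char} {v : List Int}
    (hm : (k, v) ∈ l) : l.find? (fun p => p.1 == k) = some (k, v) := by
  induction l with
  | nil => simp at hm
  | cons q t ih =>
    simp only [List.map_cons, List.nodup_cons] at hnd
    rcases List.mem_cons.mp hm with h | h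
    · subst h; simp [List.find?]
    · have hqk : q.1 ≠ k := by
        intro he
        exact hnd.1 (he ▸ (List.mem_map.mpr ⟨(k, v), h, rfl⟩))
      rw [List.find?_cons_of_neg (by simpa using hqk)]
      exact ih hnd.2 h

lemma getD_of_mem (d : PySem.Dict Char (List Int)) (hnd : d.keys.Nodup) {k : Char} {v : List Int}
    (hm : (k, v) ∈ d.items) : d.getD k [] = v := by
  unfold PySem.Dict.getD PySem.Dict.get?
  rw [find?_keys d.items hnd hm]
  rfl

lemma contains_of_mem (d : PySem.Dict Char (List Int)) {k : Char} {v : List Int}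
    (hm : (k, v) ∈ d.items) : d.contains k = true := by
  unfold PySem.Dict.contains
  refine List.any_eq_true.mpr ⟨(k, v), hm, ?_⟩
  simp

lemma map_replace_eq_self (L : List (Char × List Int)) (k : Char) (v : List Int)
    (hk : k ∉ L.map Prod.fst) :
    L.map (fun p => if (p.1 == k) = true then (k, v) else p) = L := by
  induction L with
  | nil => rfl
  | cons q t ih =>
    simp only [List.map_cons, List.mem_cons, not_or] at hk ⊢
    rw [if_neg (by simpa using fun he => hk.1 (by simp [he])), ih hk.2]

lemma insert_mem_decomp (d : PySem.Dict Char (List Int)) (hnd : d.keys.Nodup) {k : Char}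
    {v0 : List Int} (hm : (k, v0) ∈ d.items) (v : List Int) :
    ∃ L1 L2, d.items = L1 ++ (k, v0) :: L2 ∧ (d.insert k v).items = L1 ++ (k, v) :: L2 ∧
      k ∉ L1.map Prod.fst ∧ k ∉ L2.map Prod.fst := by
  obtain ⟨L1, L2, hdec⟩ := List.append_of_mem hm
  have hnd' : ((L1 ++ (k, v0) :: L2).map Prod.fst).Nodup := by
    rw [← hdec]; exact hnd
  rw [List.map_append, List.map_cons] at hnd'
  obtain ⟨hn1, hn2, hdisj⟩ := List.nodup_append.mp hnd'
  have hk1 : k ∉ L1.map Prod.fst := by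
    intro h
    simpa using hdisj k h (k, v0).1 (by simp)
  have hk2 : k ∉ L2.map Prod.fst := by simpa using (List.nodup_cons.mp hn2).1
  refine ⟨L1, L2, hdec, ?_, hk1, hk2⟩
  unfold PySem.Dict.insert
  rw [if_pos (contains_of_mem d hm)]
  show (d.items.map fun p => if (p.1 == k) = true then (k, v) else p) = _
  rw [hdec, List.map_append, List.map_cons]
  rw [map_replace_eq_self L1 k v hk1, map_replace_eq_self L2 k v hk2]
  simp

lemma insert_fresh (d : PySem.Dict Char (List Int)) {k : Char} (hc : d.contains k = false)
    (v : List Int) : (d.insert k v).items = d.items ++ [(k, v)] := by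
  unfold PySem.Dict.insert
  rw [hc]
  simp

lemma get?_none_of_not_contains (d : PySem.Dict Char (List Int)) {k : Char}
    (hc : d.contains k = false) : d.get? k = none := by
  unfold PySem.Dict.contains at hc
  unfold PySem.Dict.get?
  rw [List.find?_eq_none.mpr]
  · rfl
  · intro p hp hb
    have : d.items.any (fun p => p.1 == k) = true := List.any_eq_true.mpr ⟨p, hp, hb⟩
    rw [hc] at this
    exact Bool.false_ne_true this

lemma mem_of_contains (d : PySem.Dict Char (List Int)) {k : Char}
    (hc : d.contains k = true) : ∃ v, (k, v) ∈ d.items := by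
  unfold PySem.Dict.contains at hc
  obtain ⟨p, hp, hb⟩ := List.any_eq_true.mp hc
  have hpk : p.1 = k := by simpa using hb
  exact ⟨p.2, by rwa [← hpk, Prod.mk.eta]⟩

lemma pop_last (l : List Int) (hne : l ≠ []) :
    PySem.List.pop? l (-1) = some (l.getLast hne, l.dropLast) := by
  have hlen : 1 ≤ l.length := List.length_pos_iff.mpr hne
  unfold PySem.List.pop? PySem.List.pyIdx?
  rw [if_neg (by omega), if_pos (by omega)]
  have h1 : ((-(-1 : Int)).toNat) = 1 := rfl
  rw [h1]
  have hget : l[l.length - 1]? = some (l.getLast hne) := by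
    rw [List.getElem?_eq_getElem (by omega)]
    congr 1
    exact (List.getLast_eq_getElem hne).symm
  simp only [Option.bind_some, hget, Option.map_some, List.eraseIdx_length_sub_one]

lemma getLast_max (l : List Int) (hp : l.Pairwise (· < ·)) (hne : l ≠ []) :
    ∀ i ∈ l, i ≤ l.getLast hne := by
  intro i hi
  have hdec : l.dropLast ++ [l.getLast hne] = l := List.dropLast_append_getLast hne
  rw [← hdec] at hp hi
  rcases List.mem_append.mp hi with h | h
  · exact le_of_lt ((List.pairwise_append.mp hp).2.2 i h _ (by simp))
  · simp at h; omega

lemma enum_lb : ∀ (xs : List Char) (st : Int), ∀ p ∈ PySem.List.enumerate xs st, st ≤ p.1 := by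
  intro xs
  induction xs with
  | nil => intro st p hp; simp [PySem.List.enumerate] at hp
  | cons x t ih =>
    intro st p hp
    rcases List.mem_cons.mp hp with h | h
    · simp [h]
    · have := ih (st + 1) p h
      omega

lemma enum_pairwise : ∀ (xs : List Char) (st : Int),
    (PySem.List.enumerate xs st).Pairwise (fun p q => p.1 < q.1) := by
  intro xs
  induction xs with
  | nil => intro st; simp [PySem.List.enumerate]
  | cons x t ih =>
    intro st
    refine List.pairwise_cons.mpr ⟨?_, ih (st + 1)⟩
    intro p hp
    have := enum_lb t (st + 1) p hp
    omega

lemma bStep_r_mono (st : PySem.Dict Char (List Int) × PySem.Set Int) (p : Int × Char) :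
    ∀ i ∈ st.2, i ∈ (bStep st p).2 := by
  intro i hi
  unfold bStep
  split
  · split
    · exact hi
    · split
      · exact hi
      · exact (PySem.Set.mem_add st.2 _ i).mpr (Or.inl hi)
  · exact hi

lemma foldl_r_mono (l : List (Int × Char)) :
    ∀ st, ∀ i ∈ st.2, i ∈ (l.foldl bStep st).2 := by
  induction l with
  | nil => intro st i hi; exact hi
  | cons p t ih =>
    intro st i hi
    exact ih (bStep st p) i (bStep_r_mono st p i hi)

lemma set_contains_iff (r : PySem.Set Int) (i : Int) : PySem.Set.contains r i = true ↔ i ∈ r := by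
  unfold PySem.Set.contains
  simp

-- helper: every pair in the heap has its index on some stack, hence below the cursor
lemma heap_idx_lt {h : List (Char × Int)} {d : PySem.Dict Char (List Int)} {k : Int}
    (hperm : h.Perm (msetOf d))
    (hitems : ∀ q ∈ d.items, q.2.Pairwise (· < ·) ∧ ∀ i ∈ q.2, i < k) :
    ∀ x ∈ h, -x.2 < k := by
  intro x hx
  have hx' : x ∈ msetOf d := hperm.mem_iff.mp hx
  unfold msetOf gpair at hx'
  obtain ⟨q, hq, hmem⟩ := List.mem_flatMap.mp hx'
  obtain ⟨i, hi, hxi⟩ := List.mem_map.mp hmem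
  have hx2 : -x.2 = i := by rw [← hxi]; simp
  rw [hx2]
  exact (hitems q hq).2 i hi

lemma lexLe_antisymm {a b : Char × Int} (h1 : lexLe a b) (h2 : lexLe b a) : a = b := by
  rcases h1 with h1 | ⟨e1, le1⟩ <;> rcases h2 with h2 | ⟨e2, le2⟩
  · exact absurd h2 (lt_asymm h1)
  · exact absurd h1 (by rw [e2]; exact lt_irrefl _)
  · exact absurd h2 (by rw [e1]; exact lt_irrefl _)
  · exact Prod.ext_iff.mpr ⟨e1, le_antisymm le1 le2⟩

-- the main coupled-loop lemma
lemma main_loop : ∀ (l : List (Int × Char)) (h : List (Char × Int))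
    (d : PySem.Dict Char (List Int)) (r : PySem.Set Int) (k : Int),
    CoupleInv h d r k → (∀ p ∈ l, k ≤ p.1) → l.Pairwise (fun p q => p.1 < q.1) →
    (l.foldl aStep h).Perm ((h ++ pushesOf l).filter (aliveF (l.foldl bStep (d, r)).2)) := by
  intro l
  induction l with
  | nil =>
    intro h d r k hinv _ _
    simp only [List.foldl_nil, pushesOf, List.filter_nil, List.map_nil, List.append_nil]
    rw [List.filter_eq_self.mpr]
    intro x hx
    have := hinv.2.2.2.2.2 x hx
    simp [aliveF, this]
  | cons p t ih =>
    intro h d r k hinv hlb hpw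
    obtain ⟨hperm, hndk, hitems, hrlt, hndh, halive⟩ := hinv
    have hk_p : k ≤ p.1 := hlb p List.mem_cons_self
    have hlb' : ∀ q ∈ t, p.1 + 1 ≤ q.1 := by
      intro q hq
      have := (List.pairwise_cons.mp hpw).1 q hq
      omega
    have hpw' := (List.pairwise_cons.mp hpw).2
    by_cases hc : p.2 = '*'
    · -- star step
      by_cases hhe : h = []
      · -- empty heap: both sides skip
        subst hhe
        have hmd : msetOf d = [] := List.perm_nil.mp hperm.symm
        have hstacks : ∀ q ∈ d.items, q.2 = [] := by
          intro q hq
          have := List.flatMap_eq_nil_iff.mp hmd q hq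
          unfold gpair at this
          exact List.map_eq_nil_iff.mp this
        have hlive : d.keys.filter (fun k => !((d.getD k []).isEmpty)) = [] := by
          rw [List.filter_eq_nil_iff]
          intro a ha
          obtain ⟨q, hq, hfst⟩ := List.mem_map.mp ha
          have hqa : (a, q.2) ∈ d.items := by rwa [← hfst, Prod.mk.eta]
          rw [getD_of_mem d hndk hqa, hstacks q hq]
          simp
        have hb : bStep (d, r) p = (d, r) := by
          unfold bStep
          rw [if_pos hc]
          dsimp only
          rw [hlive]
          rfl
        have ha : aStep [] p = [] := by
          unfold aStep
          rw [if_pos hc]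
          rfl
        have hinv' : CoupleInv [] d r (p.1 + 1) := by
          refine ⟨hperm, hndk, ?_, ?_, by simp, by simp⟩
          · intro q hq
            refine ⟨(hitems q hq).1, ?_⟩
            intro i hi
            have := (hitems q hq).2 i hi
            omega
          · intro i hi
            have := hrlt i hi
            omega
        have hIH := ih [] d r (p.1 + 1) hinv' hlb' hpw'
        rw [List.foldl_cons, ha, List.foldl_cons, hb]
        have hpush : pushesOf (p :: t) = pushesOf t := by
          unfold pushesOf
          rw [List.filter_cons_of_neg (by simp [hc])]
        rw [hpush]
        exact hIH
      · -- nonempty heap: A pops the lex-least pair, B pops the min live letter's stack top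
        obtain ⟨m, hm2, hmh, hmin⟩ := min2?_spec h hhe
        have hlive_ne : ∃ a, a ∈ d.keys.filter (fun k => !((d.getD k []).isEmpty)) := by
          have hmm : m ∈ msetOf d := hperm.mem_iff.mp hmh
          unfold msetOf gpair at hmm
          obtain ⟨q, hq, hmem⟩ := List.mem_flatMap.mp hmm
          obtain ⟨i, hi, _⟩ := List.mem_map.mp hmem
          refine ⟨q.1, List.mem_filter.mpr ⟨List.mem_map.mpr ⟨q, hq, rfl⟩, ?_⟩⟩
          rw [getD_of_mem d hndk (by rwa [Prod.mk.eta])]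
          cases hq2 : q.2
          · rw [hq2] at hi; simp at hi
          · simp
        rcases hmin? : PySem.List.min? (d.keys.filter (fun k => !((d.getD k []).isEmpty))) (fun k => k) with _ | k0
        · obtain ⟨a, ha⟩ := hlive_ne
          rw [(PySem.List.min?_eq_none_iff _ _).mp hmin?] at ha
          simp at ha
        have hk0mem := PySem.List.min?_mem hmin?
        have hk0min : ∀ y ∈ d.keys.filter (fun k => !((d.getD k []).isEmpty)), k0 ≤ y :=
          fun y hy => PySem.List.min?_isMin hmin? y hy
        obtain ⟨hk0keys, hk0live⟩ := List.mem_filter.mp hk0mem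
        obtain ⟨q0, hq0, hq0fst⟩ := List.mem_map.mp hk0keys
        have hv0 : (k0, q0.2) ∈ d.items := by rwa [← hq0fst, Prod.mk.eta]
        have hgetd : d.getD k0 [] = q0.2 := getD_of_mem d hndk hv0
        have hl0ne : q0.2 ≠ [] := by
          rw [hgetd] at hk0live
          cases hq2 : q0.2
          · rw [hq2] at hk0live; simp at hk0live
          · simp
        have hpop : PySem.List.pop? (d.getD k0 []) (-1) =
            some (q0.2.getLast hl0ne, q0.2.dropLast) := by
          rw [hgetd]; exact pop_last q0.2 hl0ne
        have hb : bStep (d, r) p = (d.insert k0 q0.2.dropLast, r.add (q0.2.getLast hl0ne)) := by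
          unfold bStep
          rw [if_pos hc]
          dsimp only
          rw [hmin?]
          dsimp only
          rw [hpop]
        set i0 := q0.2.getLast hl0ne with hi0
        have hcand_mem : (k0, -i0) ∈ msetOf d := by
          unfold msetOf gpair
          exact List.mem_flatMap.mpr ⟨(k0, q0.2), hv0,
            List.mem_map.mpr ⟨i0, List.getLast_mem hl0ne, rfl⟩⟩
        have hcand_min : ∀ y ∈ msetOf d, lexLe (k0, -i0) y := by
          intro y hy
          unfold msetOf gpair at hy
          obtain ⟨q, hq, hmem⟩ := List.mem_flatMap.mp hy
          obtain ⟨i, hi, hyi⟩ := List.mem_map.mp hmem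
          have hqlive : q.1 ∈ d.keys.filter (fun k => !((d.getD k []).isEmpty)) := by
            refine List.mem_filter.mpr ⟨List.mem_map.mpr ⟨q, hq, rfl⟩, ?_⟩
            rw [getD_of_mem d hndk (by rwa [Prod.mk.eta])]
            cases hq2 : q.2
            · rw [hq2] at hi; simp at hi
            · simp
          have hk0le : k0 ≤ q.1 := hk0min q.1 hqlive
          rcases lt_or_eq_of_le hk0le with hlt | heq
          · exact Or.inl (by rw [← hyi]; exact hlt)
          · have hq_eq : q.2 = q0.2 := by
              have h1 : d.getD q.1 [] = q.2 := getD_of_mem d hndk (by rwa [Prod.mk.eta])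
              rw [← heq] at h1
              exact h1.symm.trans hgetd
            have hile : i ≤ i0 := by
              rw [hi0]
              exact getLast_max q0.2 (hitems (k0, q0.2) hv0).1 hl0ne i (hq_eq ▸ hi)
            refine Or.inr ⟨by rw [← hyi]; exact heq, by rw [← hyi]; simpa using hile⟩
        have hm_eq : m = (k0, -i0) := by
          apply lexLe_antisymm
          · exact hmin _ (hperm.mem_iff.mpr hcand_mem)
          · exact hcand_min m (hperm.mem_iff.mp hmh)
        have ha : aStep h p = h.erase m := by
          unfold aStep
          rw [if_pos hc]
          rw [hm2]
        obtain ⟨L1, L2, hdec, hins, hkL1, hkL2⟩ := insert_mem_decomp d hndk hv0 q0.2.dropLast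
        have hkeys_eq : (d.insert k0 q0.2.dropLast).keys = d.keys := by
          unfold PySem.Dict.keys
          rw [hins, hdec]
          simp
        have hmset_pop : (msetOf d).Perm ((k0, -i0) :: msetOf (d.insert k0 q0.2.dropLast)) := by
          have hsplit : q0.2.dropLast ++ [i0] = q0.2 := List.dropLast_append_getLast hl0ne
          have e1 : msetOf d = L1.flatMap gpair ++
              (q0.2.dropLast.map (fun i => (k0, -i)) ++ ((k0, -i0) :: L2.flatMap gpair)) := by
            unfold msetOf
            rw [hdec, List.flatMap_append, List.flatMap_cons]
            have hg : gpair (k0, q0.2) = q0.2.dropLast.map (fun i => (k0, -i)) ++ [(k0, -i0)] := by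
              unfold gpair
              conv_lhs => rw [← hsplit]
              rw [List.map_append]
              rfl
            rw [hg]
            simp [List.append_assoc]
          have e2 : msetOf (d.insert k0 q0.2.dropLast) = L1.flatMap gpair ++
              (q0.2.dropLast.map (fun i => (k0, -i)) ++ L2.flatMap gpair) := by
            unfold msetOf
            rw [hins, List.flatMap_append, List.flatMap_cons]
            rfl
          rw [e1, e2]
          have hpm := List.perm_middle (a := (k0, -i0))
            (l₁ := L1.flatMap gpair ++ q0.2.dropLast.map (fun i => (k0, -i)))
            (l₂ := L2.flatMap gpair)
          simpa [List.append_assoc] using hpm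
        have hperm' : (h.erase m).Perm (msetOf (d.insert k0 q0.2.dropLast)) := by
          have h1 := (hperm.trans hmset_pop).erase m
          rw [hm_eq] at h1 ⊢
          rwa [List.erase_cons_head] at h1
        have hinv' : CoupleInv (h.erase m) (d.insert k0 q0.2.dropLast) (r.add i0) (p.1 + 1) := by
          refine ⟨hperm', by rw [hkeys_eq]; exact hndk, ?_, ?_, ?_, ?_⟩
          · intro q hq
            rw [hins] at hq
            have hq' : q ∈ d.items ∨ q = (k0, q0.2.dropLast) := by
              rw [hdec]
              rcases List.mem_append.mp hq with h1 | h1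
              · exact Or.inl (List.mem_append.mpr (Or.inl h1))
              · rcases List.mem_cons.mp h1 with h2 | h2
                · exact Or.inr h2
                · exact Or.inl (List.mem_append.mpr (Or.inr (List.mem_cons.mpr (Or.inr h2))))
            rcases hq' with h1 | h1
            · refine ⟨(hitems q h1).1, ?_⟩
              intro i hi
              have := (hitems q h1).2 i hi
              omega
            · subst h1
              refine ⟨List.Pairwise.sublist (List.dropLast_sublist _) (hitems (k0, q0.2) hv0).1, ?_⟩
              intro i hi
              have := (hitems (k0, q0.2) hv0).2 i (List.dropLast_subset _ hi)
              omega
          · intro i hi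
            rcases (PySem.Set.mem_add r i0 i).mp hi with h1 | h1
            · have := hrlt i h1
              omega
            · subst h1
              have := (hitems (k0, q0.2) hv0).2 i0 (List.getLast_mem hl0ne)
              omega
          · exact List.Nodup.sublist (List.Sublist.map _ List.erase_sublist) hndh
          · intro x hx
            have hxh : x ∈ h := List.mem_of_mem_erase hx
            intro hmem
            rcases (PySem.Set.mem_add r i0 (-x.2)).mp hmem with h1 | h1
            · exact halive x hxh h1
            · have hxm : x = m := by
                apply List.inj_on_of_nodup_map hndh hxh hmh
                rw [hm_eq]
                show -x.2 = -(-i0)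
                omega
              have hh_nd : h.Nodup := List.Nodup.of_map _ hndh
              exact (List.Nodup.not_mem_erase hh_nd) (hxm ▸ hx)
        have hIH := ih (h.erase m) (d.insert k0 q0.2.dropLast) (r.add i0) (p.1 + 1) hinv' hlb' hpw'
        rw [List.foldl_cons, ha, List.foldl_cons, hb]
        have hpush : pushesOf (p :: t) = pushesOf t := by
          unfold pushesOf
          rw [List.filter_cons_of_neg (by simp [hc])]
        rw [hpush]
        have hi0fin : i0 ∈ (t.foldl bStep (d.insert k0 q0.2.dropLast, r.add i0)).2 := by
          apply foldl_r_mono t (d.insert k0 q0.2.dropLast, r.add i0)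
          exact (PySem.Set.mem_add r i0 i0).mpr (Or.inr rfl)
        have hbig : (h ++ pushesOf t).Perm (m :: (h.erase m ++ pushesOf t)) := by
          have h1 := (List.perm_cons_erase hmh).append_right (pushesOf t)
          simpa using h1
        have hfil := hbig.filter (aliveF (t.foldl bStep (d.insert k0 q0.2.dropLast, r.add i0)).2)
        rw [List.filter_cons_of_neg ?hdead] at hfil
        case hdead =>
          simp only [aliveF, hm_eq, Bool.not_eq_true', Bool.not_eq_false]
          rw [show -(-i0 : Int) = i0 by omega]
          exact (set_contains_iff _ i0).mpr hi0fin
        exact hIH.trans hfil.symm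
    · -- push step
      have ha : aStep h p = h ++ [(p.2, -p.1)] := by
        unfold aStep
        rw [if_neg hc]
      have hb : bStep (d, r) p = (d.modify p.2 [] (fun l => l ++ [p.1]), r) := by
        unfold bStep
        rw [if_neg hc]
      have hmod : d.modify p.2 [] (fun l => l ++ [p.1]) = d.insert p.2 (d.getD p.2 [] ++ [p.1]) := rfl
      have hidx := heap_idx_lt hperm hitems
      have hinv' : CoupleInv (h ++ [(p.2, -p.1)]) (d.modify p.2 [] (fun l => l ++ [p.1])) r (p.1 + 1) := by
        rcases hcon : d.contains p.2 with _ | _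
        · -- fresh letter
          have hgd : d.getD p.2 [] = [] := by
            unfold PySem.Dict.getD
            rw [get?_none_of_not_contains d hcon]
            rfl
          have hitems' : (d.modify p.2 [] (fun l => l ++ [p.1])).items = d.items ++ [(p.2, [p.1])] := by
            rw [hmod, hgd]
            exact insert_fresh d hcon [p.1]
          have hknot : p.2 ∉ d.keys := by
            intro hk
            obtain ⟨q, hq, hfst⟩ := List.mem_map.mp hk
            exact absurd (contains_of_mem d (show (p.2, q.2) ∈ d.items by rwa [← hfst, Prod.mk.eta]))
              (by rw [hcon]; simp)
          refine ⟨?_, ?_, ?_, ?_, ?_, ?_⟩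
          · unfold msetOf
            rw [hitems', List.flatMap_append]
            have h2 := hperm.append_right [(p.2, -p.1)]
            unfold msetOf at h2
            simpa [gpair] using h2
          · unfold PySem.Dict.keys
            rw [hitems']
            simp only [List.map_append, List.map_cons, List.map_nil]
            rw [List.nodup_append]
            refine ⟨hndk, by simp, ?_⟩
            intro a ha b hb2
            have hb3 : b = p.2 := by simpa using hb2
            subst hb3
            intro he
            exact hknot (he ▸ ha)
          · intro q hq
            rw [hitems'] at hq
            rcases List.mem_append.mp hq with h1 | h1
            · refine ⟨(hitems q h1).1, ?_⟩
              intro i hi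
              have := (hitems q h1).2 i hi
              omega
            · simp only [List.mem_singleton] at h1
              subst h1
              refine ⟨by simp, ?_⟩
              intro i hi
              simp only [List.mem_singleton] at hi
              omega
          · intro i hi
            have := hrlt i hi
            omega
          · rw [List.map_append, List.nodup_append]
            refine ⟨hndh, by simp, ?_⟩
            intro a ha b hb2
            have hb3 : b = p.1 := by simpa using hb2
            obtain ⟨x, hx, hxa⟩ := List.mem_map.mp ha
            have hlt := hidx x hx
            have hxa' : -x.2 = a := hxa
            intro he
            omega
          · intro x hx
            rcases List.mem_append.mp hx with h1 | h1
            · exact halive x h1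
            · simp only [List.mem_singleton] at h1
              subst h1
              intro hmem
              have := hrlt _ hmem
              simp only [neg_neg] at this
              omega
        · -- existing letter: its stack grows
          obtain ⟨v, hv⟩ := mem_of_contains d hcon
          have hgd : d.getD p.2 [] = v := getD_of_mem d hndk hv
          obtain ⟨L1, L2, hdec, hins, hkL1, hkL2⟩ := insert_mem_decomp d hndk hv (v ++ [p.1])
          have hitems' : (d.modify p.2 [] (fun l => l ++ [p.1])).items = L1 ++ (p.2, v ++ [p.1]) :: L2 := by
            rw [hmod, hgd]
            exact hins
          have hvbnd := hitems (p.2, v) hv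
          refine ⟨?_, ?_, ?_, ?_, ?_, ?_⟩
          · have e1 : msetOf d = L1.flatMap gpair ++
                (v.map (fun i => (p.2, -i)) ++ L2.flatMap gpair) := by
              unfold msetOf
              rw [hdec, List.flatMap_append, List.flatMap_cons]
              rfl
            have e2 : msetOf (d.modify p.2 [] (fun l => l ++ [p.1])) = L1.flatMap gpair ++
                (v.map (fun i => (p.2, -i)) ++ ([(p.2, -p.1)] ++ L2.flatMap gpair)) := by
              unfold msetOf
              rw [hitems', List.flatMap_append, List.flatMap_cons]
              have hg : gpair (p.2, v ++ [p.1]) = v.map (fun i => (p.2, -i)) ++ [(p.2, -p.1)] := by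
                unfold gpair
                rw [List.map_append]
                rfl
              rw [hg]
              simp [List.append_assoc]
            rw [e2]
            refine (hperm.append_right [(p.2, -p.1)]).trans ?_
            rw [e1]
            have hre : (L1.flatMap gpair ++ (v.map (fun i => (p.2, -i)) ++ L2.flatMap gpair))
                ++ [(p.2, -p.1)] = L1.flatMap gpair ++
                (v.map (fun i => (p.2, -i)) ++ (L2.flatMap gpair ++ [(p.2, -p.1)])) := by
              simp [List.append_assoc]
            rw [hre]
            exact List.Perm.append_left _ (List.Perm.append_left _ List.perm_append_comm)
          · have hkeq : (d.modify p.2 [] (fun l => l ++ [p.1])).keys = d.keys := by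
              unfold PySem.Dict.keys
              rw [hitems', hdec]
              simp
            rw [hkeq]
            exact hndk
          · intro q hq
            rw [hitems'] at hq
            have hq' : q ∈ d.items ∨ q = (p.2, v ++ [p.1]) := by
              rw [hdec]
              rcases List.mem_append.mp hq with h1 | h1
              · exact Or.inl (List.mem_append.mpr (Or.inl h1))
              · rcases List.mem_cons.mp h1 with h2 | h2
                · exact Or.inr h2
                · exact Or.inl (List.mem_append.mpr (Or.inr (List.mem_cons.mpr (Or.inr h2))))
            rcases hq' with h1 | h1
            · refine ⟨(hitems q h1).1, ?_⟩
              intro i hi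
              have := (hitems q h1).2 i hi
              omega
            · subst h1
              constructor
              · rw [List.pairwise_append]
                refine ⟨hvbnd.1, by simp, ?_⟩
                intro a ha b hb'
                simp only [List.mem_singleton] at hb'
                subst hb'
                have := hvbnd.2 a ha
                omega
              · intro i hi
                rcases List.mem_append.mp hi with h2 | h2
                · have := hvbnd.2 i h2
                  omega
                · simp only [List.mem_singleton] at h2
                  omega
          · intro i hi
            have := hrlt i hi
            omega
          · rw [List.map_append, List.nodup_append]
            refine ⟨hndh, by simp, ?_⟩
            intro a ha b hb2
            have hb3 : b = p.1 := by simpa using hb2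
            obtain ⟨x, hx, hxa⟩ := List.mem_map.mp ha
            have hlt := hidx x hx
            have hxa' : -x.2 = a := hxa
            intro he
            omega
          · intro x hx
            rcases List.mem_append.mp hx with h1 | h1
            · exact halive x h1
            · simp only [List.mem_singleton] at h1
              subst h1
              intro hmem
              have := hrlt _ hmem
              simp only [neg_neg] at this
              omega
      have hIH := ih (h ++ [(p.2, -p.1)]) (d.modify p.2 [] (fun l => l ++ [p.1])) r (p.1 + 1) hinv' hlb' hpw'
      rw [List.foldl_cons, ha, List.foldl_cons, hb]
      have hpush : pushesOf (p :: t) = (p.2, -p.1) :: pushesOf t := by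
        unfold pushesOf
        rw [List.filter_cons_of_pos (by simp [hc])]
        rfl
      rw [hpush]
      have hassoc : h ++ (p.2, -p.1) :: pushesOf t = (h ++ [(p.2, -p.1)]) ++ pushesOf t := by
        simp
      rw [hassoc]
      exact hIH

-- ===== VERDICT (by name: the statement is the Claim_ definition above) =====
theorem clearStars_spec : Claim_equal_clearStars := by
  unfold Claim_equal_clearStars Spec_clearStars
  intro s _
  unfold clearStars clearStars_alt
  simp only []
  have hinv : CoupleInv [] PySem.Dict.empty PySem.Set.empty 0 := by
    refine ⟨?_, ?_, ?_, ?_, ?_, ?_⟩ <;>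
      simp [msetOf, PySem.Dict.empty, PySem.Dict.keys, PySem.Set.empty]
  have hmain := main_loop (PySem.List.enumerate s.toList) [] PySem.Dict.empty PySem.Set.empty 0
    hinv (enum_lb s.toList 0) (enum_pairwise s.toList 0)
  rw [List.nil_append] at hmain
  congr 1
  have hsorted : PySem.List.sorted ((PySem.List.enumerate s.toList).foldl aStep [])
      (fun x => -x.2) false = (pushesOf (PySem.List.enumerate s.toList)).filter
        (aliveF ((PySem.List.enumerate s.toList).foldl bStep (PySem.Dict.empty, PySem.Set.empty)).2) := by
    apply PySem.List.sorted_eq_of_perm_of_pairwise_lt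
    · exact hmain.symm
    · have hp1 := enum_pairwise s.toList 0
      have hp2 : (pushesOf (PySem.List.enumerate s.toList)).Pairwise (fun a b => -a.2 < -b.2) := by
        unfold pushesOf
        rw [List.pairwise_map]
        exact (hp1.filter _).imp (by intro a b hab; simpa using hab)
      exact hp2.filter _
  rw [hsorted]
  unfold pushesOf aliveF
  rw [List.filter_map, List.map_map, List.filter_filter]
  have hfeq := List.filter_congr (l := PySem.List.enumerate s.toList)
    (p := fun a => ((fun x : Char × Int =>
        !(PySem.Set.contains ((PySem.List.enumerate s.toList).foldl bStep
          (PySem.Dict.empty, PySem.Set.empty)).2 (-x.2))) ∘ (fun p : Int × Char => (p.2, -p.1))) a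
        && !(a.2 == '*'))
    (q := fun p => !(p.2 == '*') &&
        !(PySem.Set.contains ((PySem.List.enumerate s.toList).foldl bStep
          (PySem.Dict.empty, PySem.Set.empty)).2 p.1))
    (by intro x _; simp [Function.comp, Bool.and_comm])
  rw [hfeq]
  rfl
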